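-- pv_equiv track=rewrite | github.com/0417taehyun/Codeit | 머신러닝 & 딥러닝/STEP 2 데이터 사이언스 기초/01. 데이터 사이언스 시작하기/02.py | bit_manipulation
-- ===== SOURCE A (Python) =====
-- def bit_manipulation(word: str) -> bool:
--     answer: int = 0
--     words: set = set(word)
--
--     for character in word:
--         answer ^= ord(character)
--
--     if answer == 0 or chr(answer) in words:
--         return True
--     else:
--         return False
-- ===== SOURCE B (Python) =====
-- def bit_manipulation(word: str) -> bool:
--     counts = {}
--     for ch in word:
--         counts[ch] = counts.get(ch, 0) + 1
--     answer = 0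
--     for ch, cnt in counts.items():
--         if cnt % 2 == 1:
--             answer ^= ord(ch)
--     return answer == 0 or chr(answer) in counts
-- ===== Notes on version B (the rewrite author's own statement) =====
-- stated objective: alternative
-- what changed: B first builds a character-frequency dict, then XORs ord(c) only over distinct characters with odd count (even multiplicities cancel in XOR), and tests chr(answer) against the dict's keys instead of a separate set.
import Mathlib
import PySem

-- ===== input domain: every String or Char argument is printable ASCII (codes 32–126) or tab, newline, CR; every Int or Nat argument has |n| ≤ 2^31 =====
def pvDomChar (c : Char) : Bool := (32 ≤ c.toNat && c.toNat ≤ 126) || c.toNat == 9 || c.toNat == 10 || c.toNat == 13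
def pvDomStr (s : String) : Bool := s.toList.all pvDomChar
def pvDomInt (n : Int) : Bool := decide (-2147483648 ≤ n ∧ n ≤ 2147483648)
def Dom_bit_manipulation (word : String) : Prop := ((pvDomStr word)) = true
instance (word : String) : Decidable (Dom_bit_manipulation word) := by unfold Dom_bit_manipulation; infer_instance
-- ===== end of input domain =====

-- B replaces A's flat per-character XOR over the string by a frequency dict and an XOR over
-- the distinct odd-count characters (alternative decomposition; same asymptotic cost).

-- ===== PORT A =====
def bit_manipulation (word : String) : Bool :=
  let answer : Nat := word.toList.foldl (fun a c => a ^^^ c.toNat) 0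
  let words : PySem.Set Char := PySem.Set.ofList word.toList
  if answer == 0 || PySem.Set.contains words (Char.ofNat answer) then true else false

-- ===== PORT B =====
def bit_manipulation_alt (word : String) : Bool :=
  let counts : PySem.Dict Char Int :=
    word.toList.foldl (fun d c => d.insert c (d.getD c 0 + 1)) PySem.Dict.empty
  let answer : Nat := counts.items.foldl
    (fun a kv => if PySem.Int.mod kv.2 2 == 1 then a ^^^ kv.1.toNat else a) 0
  answer == 0 || counts.contains (Char.ofNat answer)

-- ===== PRECONDITION & SPEC =====
def Spec_bit_manipulation (word : String) (out : Bool) : Prop := out = bit_manipulation_alt word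
instance (word : String) (out : Bool) : Decidable (Spec_bit_manipulation word out) := by unfold Spec_bit_manipulation; infer_instance

-- ===== CLAIM (what is proved, stated in full; the proofs are below) =====
def Claim_equal_bit_manipulation : Prop := ∀ (word : String), Dom_bit_manipulation word → Spec_bit_manipulation word (bit_manipulation word)

-- ===== LEMMAS AND PROOFS =====

-- pull a XOR-fold's initial accumulator out in front
theorem pv_foldl_xor_init (h : Char → Nat) (l : List Char) (a : Nat) :
    l.foldl (fun x c => x ^^^ h c) a = a ^^^ l.foldl (fun x c => x ^^^ h c) 0 := by
  induction l generalizing a with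
  | nil => simp
  | cons c t ih =>
    simp only [List.foldl_cons]
    rw [ih (a ^^^ h c), ih (0 ^^^ h c), Nat.zero_xor, Nat.xor_assoc]

-- splitting one character's occurrences out of the XOR of a list
theorem pv_xor_split (l : List Char) (c : Char) :
    l.foldl (fun a x => a ^^^ x.toNat) 0 =
      (if l.count c % 2 = 1 then c.toNat else 0) ^^^
        (l.filter (· ≠ c)).foldl (fun a x => a ^^^ x.toNat) 0 := by
  induction l with
  | nil => simp
  | cons b t ih =>
    by_cases hbc : b = c
    · subst hbc
      simp only [List.foldl_cons, List.count_cons_self, List.filter_cons, ne_eq,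
        not_true_eq_false, decide_false]
      rw [pv_foldl_xor_init (fun x => x.toNat) t (0 ^^^ b.toNat), ih, Nat.zero_xor,
        ← Nat.xor_assoc]
      congr 1
      rcases Nat.even_or_odd (t.count b) with he | ho
      · have h1 : ¬ t.count b % 2 = 1 := by
          rcases he with ⟨k, hk⟩; omega
        have h2 : (t.count b + 1) % 2 = 1 := by
          rcases he with ⟨k, hk⟩; omega
        rw [if_neg h1, if_pos h2, Nat.xor_zero]
      · have h1 : t.count b % 2 = 1 := Nat.odd_iff.mp ho
        have h2 : ¬ (t.count b + 1) % 2 = 1 := by omega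
        rw [if_pos h1, if_neg h2, Nat.xor_self]
    · have hcb : (b == c) = false := beq_eq_false_iff_ne.mpr hbc
      have hcnt : (b :: t).count c = t.count c := by
        rw [List.count_cons, hcb]
        simp
      have hfil : (b :: t).filter (· ≠ c) = b :: t.filter (· ≠ c) := by
        simp [hbc]
      rw [hcnt, hfil]
      simp only [List.foldl_cons]
      rw [pv_foldl_xor_init (fun x => x.toNat) t (0 ^^^ b.toNat),
          pv_foldl_xor_init (fun x => x.toNat) (t.filter (· ≠ c)) (0 ^^^ b.toNat), ih]
      simp only [Nat.zero_xor]
      rw [← Nat.xor_assoc, ← Nat.xor_assoc, Nat.xor_comm b.toNat]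

-- XOR over distinct odd-count characters equals the flat XOR over the whole list
theorem pv_odd_xor (s l : List Char) (hnd : s.Nodup) (hsub : ∀ c ∈ l, c ∈ s) :
    s.foldl (fun a c => if l.count c % 2 = 1 then a ^^^ c.toNat else a) 0 =
      l.foldl (fun a x => a ^^^ x.toNat) 0 := by
  induction s generalizing l with
  | nil =>
    have : l = [] := by
      cases l with
      | nil => rfl
      | cons x t => exact absurd (hsub x (by simp)) (by simp)
    simp [this]
  | cons c s' ih =>
    have hnd' : s'.Nodup := hnd.of_cons
    have hcs' : c ∉ s' := (List.nodup_cons.mp hnd).1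
    simp only [List.foldl_cons]
    have hsub' : ∀ x ∈ l.filter (· ≠ c), x ∈ s' := by
      intro x hx
      rcases List.mem_filter.mp hx with ⟨hx', hne'⟩
      have hne : x ≠ c := by simpa using hne'
      rcases List.mem_cons.mp (hsub x hx') with h | h
      · exact absurd h hne
      · exact h
    have hcount : ∀ x ∈ s', l.count x = (l.filter (· ≠ c)).count x := by
      intro x hxs
      have hne : x ≠ c := fun h => hcs' (h ▸ hxs)
      rw [List.count_filter]
      simp [hne]
    -- switch the counts inside the fold from l to l.filter (· ≠ c)
    rw [PySem.List.foldl_congr_mem s'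
      (fun a x => if l.count x % 2 = 1 then a ^^^ x.toNat else a)
      (fun a x => if (l.filter (· ≠ c)).count x % 2 = 1 then a ^^^ x.toNat else a)
      _ (fun acc x hx => by beta_reduce; rw [hcount x hx])]
    -- turn the conditional fold into a plain xor-fold to extract the initial value
    rw [PySem.List.foldl_congr_mem s'
      (fun a x => if (l.filter (· ≠ c)).count x % 2 = 1 then a ^^^ x.toNat else a)
      (fun a x => a ^^^ (if (l.filter (· ≠ c)).count x % 2 = 1 then x.toNat else 0))
      _ (fun acc x _ => by beta_reduce; split <;> simp)]
    rw [pv_foldl_xor_init (fun x => if (l.filter (· ≠ c)).count x % 2 = 1 then x.toNat else 0) s']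
    rw [PySem.List.foldl_congr_mem s'
      (fun a x => a ^^^ (if (l.filter (· ≠ c)).count x % 2 = 1 then x.toNat else 0))
      (fun a x => if (l.filter (· ≠ c)).count x % 2 = 1 then a ^^^ x.toNat else a)
      _ (fun acc x _ => by beta_reduce; split <;> simp)]
    rw [ih _ hnd' hsub', pv_xor_split l c]
    congr 1
    split <;> simp

theorem bit_manipulation_eq (word : String) :
    bit_manipulation word = bit_manipulation_alt word := by
  have hcounter :
      word.toList.foldl (fun d c => d.insert c (d.getD c 0 + 1)) PySem.Dict.empty =
        PySem.Dict.counter word.toList :=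
    PySem.Dict.foldl_insert_getD_add_one_eq_counter word.toList
  simp only [bit_manipulation, bit_manipulation_alt, hcounter]
  set l := word.toList with hl
  have hitems : (PySem.Dict.counter l).items =
      (PySem.Set.ofList l).map (fun k => (k, (l.count k : Int))) := PySem.Dict.items_counter l
  have hmod : ∀ (k : Char),
      (PySem.Int.mod ((l.count k : Int)) 2 == 1) = decide (l.count k % 2 = 1) := by
    intro k
    have hm : PySem.Int.mod ((l.count k : Int)) 2 = ((l.count k % 2 : Nat) : Int) := by
      simp [pysem]
    rw [hm]
    rcases Nat.mod_two_eq_zero_or_one (l.count k) with h0 | h1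
    · simp [h0]
    · simp [h1]
  have hans :
      (PySem.Dict.counter l).items.foldl
          (fun a kv => if PySem.Int.mod kv.2 2 == 1 then a ^^^ kv.1.toNat else a) 0 =
        l.foldl (fun a c => a ^^^ c.toNat) 0 := by
    rw [hitems, List.foldl_map]
    rw [PySem.List.foldl_congr_mem (PySem.Set.ofList l)
      (fun a k => if PySem.Int.mod ((l.count k : Int)) 2 == 1 then a ^^^ k.toNat else a)
      (fun a k => if l.count k % 2 = 1 then a ^^^ k.toNat else a)
      _ (fun acc x _ => by beta_reduce; rw [hmod x]; simp)]
    exact pv_odd_xor (PySem.Set.ofList l) l (PySem.Set.nodup_ofList l)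
      (fun c hc => (PySem.Set.mem_ofList l c).mpr hc)
  have hmem : ∀ x : Char, (PySem.Dict.counter l).contains x =
      PySem.Set.contains (PySem.Set.ofList l) x := by
    intro x
    simp [pysem]
  rw [hans, hmem]
  split <;> simp_all

-- ===== VERDICT (by name: the statement is the Claim_ definition above) =====
theorem bit_manipulation_spec : Claim_equal_bit_manipulation := by
  intro word _
  unfold Spec_bit_manipulation
  exact bit_manipulation_eq word
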